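-- pv_equiv track=rewrite | github.com/Thrynk/adventofcode2025 | day_9/part_2.py | get_rectangle_corners
-- ===== SOURCE A (Python) =====
-- from typing import List, Set, Tuple
--
-- X_INDEX = 1
--
-- Y_INDEX = 0
--
-- def get_rectangle_corners(rectangle_tiles: List[Tuple[int, int]]) -> List[Tuple[Tuple[int, int], Tuple[int, int]]]:
--     """
--     Get all corners of a rectangle from its opposite corners.
--     """
--
--     x_coordinates = [tile[X_INDEX] for tile in rectangle_tiles]
--     y_coordinates = [tile[Y_INDEX] for tile in rectangle_tiles]
--
--     # Calculate corners
--     top_left_x = min(x_coordinates)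
--     top_left_y = min(y_coordinates)
--     bottom_right_x = max(x_coordinates)
--     bottom_right_y = max(y_coordinates)
--     width = max(x_coordinates) - min(x_coordinates) + 1
--     height = max(y_coordinates) - min(y_coordinates) + 1
--     top_right_x = top_left_x
--     top_right_y = top_left_y + height - 1
--     bottom_left_x = top_left_x + width - 1
--     bottom_left_y = top_left_y
--
--     # Return the four edges
--     return [
--         (bottom_left_y, bottom_left_x),  # bottom edge
--         (bottom_right_y, bottom_right_x),    # right edge
--         (top_right_y, top_right_x),        # top edge
--         (top_left_y, top_left_x)       # left edge
--     ]
-- ===== SOURCE B (Python) =====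
-- def get_rectangle_corners(rectangle_tiles):
--     """Single pass over the tiles keeping running extrema; corners emitted directly."""
--     y0, x0 = rectangle_tiles[0]
--     min_x = max_x = x0
--     min_y = max_y = y0
--     for y, x in rectangle_tiles[1:]:
--         if x < min_x:
--             min_x = x
--         elif x > max_x:
--             max_x = x
--         if y < min_y:
--             min_y = y
--         elif y > max_y:
--             max_y = y
--     return [(min_y, max_x), (max_y, max_x), (max_y, min_x), (min_y, min_x)]
-- ===== Notes on version B (the rewrite author's own statement) =====
-- stated objective: alternative
-- what changed: Replaces the two projected coordinate lists and four separate min/max library scans with one fold over the tiles that maintains running min/max for both axes and emits the four corners directly.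
-- outside the precondition, e.g. on get_rectangle_corners([]): A raises ValueError, B raises IndexError
import Mathlib
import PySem

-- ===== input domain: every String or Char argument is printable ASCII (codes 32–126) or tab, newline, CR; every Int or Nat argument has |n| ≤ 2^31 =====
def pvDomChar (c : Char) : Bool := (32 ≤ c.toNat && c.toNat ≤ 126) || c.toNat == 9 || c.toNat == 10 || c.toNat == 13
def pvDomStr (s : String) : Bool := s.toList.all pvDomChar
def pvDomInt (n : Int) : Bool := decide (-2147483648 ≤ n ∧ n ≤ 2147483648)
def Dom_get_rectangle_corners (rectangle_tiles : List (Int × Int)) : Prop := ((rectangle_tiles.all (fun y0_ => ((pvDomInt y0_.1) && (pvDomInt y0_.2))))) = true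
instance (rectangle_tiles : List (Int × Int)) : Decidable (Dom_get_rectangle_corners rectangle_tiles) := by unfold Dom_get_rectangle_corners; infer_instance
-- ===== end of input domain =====

-- B replaces A's two projected lists and four min/max scans by one running-extrema fold; return value only.

-- ===== PORT A =====
def get_rectangle_corners (rectangle_tiles : List (Int × Int)) : List (Int × Int) :=
  let x_coordinates := rectangle_tiles.map (fun tile => tile.2)
  let y_coordinates := rectangle_tiles.map (fun tile => tile.1)
  match PySem.List.min? x_coordinates (fun v => v), PySem.List.min? y_coordinates (fun v => v),
        PySem.List.max? x_coordinates (fun v => v), PySem.List.max? y_coordinates (fun v => v) with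
  | some top_left_x, some top_left_y, some bottom_right_x, some bottom_right_y =>
      let width := bottom_right_x - top_left_x + 1
      let height := bottom_right_y - top_left_y + 1
      let top_right_x := top_left_x
      let top_right_y := top_left_y + height - 1
      let bottom_left_x := top_left_x + width - 1
      let bottom_left_y := top_left_y
      [(bottom_left_y, bottom_left_x), (bottom_right_y, bottom_right_x),
       (top_right_y, top_right_x), (top_left_y, top_left_x)]
  | _, _, _, _ => []   -- min([]) raises ValueError in Python; excluded by Pre_

-- ===== PORT B =====
def pvAltLoop : List (Int × Int) → Int → Int → Int → Int → Int × Int × Int × Int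
  | [], min_y, max_y, min_x, max_x => (min_y, max_y, min_x, max_x)
  | (y, x) :: rest, min_y, max_y, min_x, max_x =>
      let min_x' := if x < min_x then x else min_x
      let max_x' := if x < min_x then max_x else if x > max_x then x else max_x
      let min_y' := if y < min_y then y else min_y
      let max_y' := if y < min_y then max_y else if y > max_y then y else max_y
      pvAltLoop rest min_y' max_y' min_x' max_x'

def get_rectangle_corners_alt (rectangle_tiles : List (Int × Int)) : List (Int × Int) :=
  match rectangle_tiles with
  | [] => []   -- rectangle_tiles[0] raises IndexError in Python; excluded by Pre_
  | (y0, x0) :: rest =>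
      let (min_y, max_y, min_x, max_x) := pvAltLoop rest y0 y0 x0 x0
      [(min_y, max_x), (max_y, max_x), (max_y, min_x), (min_y, min_x)]

-- ===== PRECONDITION & SPEC =====
-- A raises ValueError (min of empty sequence) on []; Pre_ excludes exactly that input.
def Pre_get_rectangle_corners (rectangle_tiles : List (Int × Int)) : Prop := rectangle_tiles ≠ []
instance (rectangle_tiles : List (Int × Int)) : Decidable (Pre_get_rectangle_corners rectangle_tiles) := by unfold Pre_get_rectangle_corners; infer_instance
def pvWitness_get_rectangle_corners : (List (Int × Int)) := [(1, 2), (3, 4)]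

def Spec_get_rectangle_corners (rectangle_tiles : List (Int × Int)) (out : List (Int × Int)) : Prop := out = get_rectangle_corners_alt rectangle_tiles
instance (rectangle_tiles : List (Int × Int)) (out : List (Int × Int)) : Decidable (Spec_get_rectangle_corners rectangle_tiles out) := by unfold Spec_get_rectangle_corners; infer_instance

-- ===== CLAIM (what is proved, stated in full; the proofs are below) =====
def Claim_equal_get_rectangle_corners : Prop := ∀ (rectangle_tiles : List (Int × Int)), Dom_get_rectangle_corners rectangle_tiles → Pre_get_rectangle_corners rectangle_tiles → Spec_get_rectangle_corners rectangle_tiles (get_rectangle_corners rectangle_tiles)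

-- ===== LEMMAS AND PROOFS =====

-- The running-extrema loop computes the four independent folds, given min ≤ max invariants.
theorem pvAltLoop_eq_folds (rest : List (Int × Int)) :
    ∀ (min_y max_y min_x max_x : Int), min_y ≤ max_y → min_x ≤ max_x →
    pvAltLoop rest min_y max_y min_x max_x =
      (rest.foldl (fun a t => min a t.1) min_y,
       rest.foldl (fun a t => max a t.1) max_y,
       rest.foldl (fun a t => min a t.2) min_x,
       rest.foldl (fun a t => max a t.2) max_x) := by
  induction rest with
  | nil => intro _ _ _ _ _ _; rfl
  | cons hd tl ih =>
      intro min_y max_y min_x max_x hy hx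
      obtain ⟨y, x⟩ := hd
      simp only [pvAltLoop, List.foldl_cons]
      have h1 : (if x < min_x then x else min_x) = min min_x x := by omega
      have h2 : (if x < min_x then max_x else if x > max_x then x else max_x) = max max_x x := by omega
      have h3 : (if y < min_y then y else min_y) = min min_y y := by omega
      have h4 : (if y < min_y then max_y else if y > max_y then y else max_y) = max max_y y := by omega
      rw [h1, h2, h3, h4]
      exact ih _ _ _ _ (by omega) (by omega)

theorem get_rectangle_corners_spec : Claim_equal_get_rectangle_corners := by
  intro ts _ hpre
  unfold Spec_get_rectangle_corners
  match ts with
  | [] => exact absurd rfl hpre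
  | (y0, x0) :: rest =>
      show get_rectangle_corners ((y0, x0) :: rest) = _
      unfold get_rectangle_corners get_rectangle_corners_alt
      simp only [List.map_cons, PySem.List.min?_id_cons, PySem.List.max?_id_cons,
        List.foldl_map, pvAltLoop_eq_folds rest y0 y0 x0 x0 le_rfl le_rfl]
      have h : ∀ a b : Int, a + (b - a + 1) - 1 = b := fun a b => by ring
      simp [h]
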